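-- pv_equiv track=rewrite | github.com/ragul-kachiappan/Line-Encoding-Schemes | src/line_encoding/encoders/base.py | ami
-- ===== SOURCE A (Python) =====
-- from typing import List
--
-- def ami(b: List[int]) -> List[int]:
--     """Alternate Mark Inversion (AMI) encoding.
--
--     Args:
--         b: List of binary input bits
--
--     Returns:
--         List of encoded values
--     """
--     e = []
--     first = 1
--     flag = 0
--     for i in range(len(b)):
--         if b[i] == 0:
--             e.append(0)
--         else:
--             if first:
--                 e.append(1)
--                 flag = 1
--                 first = 0
--             else:
--                 if flag == 1:
--                     e.append(-1)
--                     flag = 0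
--                 else:
--                     e.append(1)
--                     flag = 1
--     e.append(-1)
--     return e
-- ===== SOURCE B (Python) =====
-- from typing import List
--
-- def ami(b: List[int]) -> List[int]:
--     """Alternate Mark Inversion (AMI) encoding via a mark-index pass."""
--     e = [0] * len(b)
--     marks = [i for i, x in enumerate(b) if x != 0]
--     for j, i in enumerate(marks):
--         e[i] = 1 if j % 2 == 0 else -1
--     e.append(-1)
--     return e
-- ===== Notes on version B (the rewrite author's own statement) =====
-- stated objective: alternative
-- what changed: B preallocates a zero list, collects the indices of nonzero marks in one comprehension, then writes +1/-1 by the mark's parity, instead of A's single scan driven by first/flag toggle state.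
import Mathlib
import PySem

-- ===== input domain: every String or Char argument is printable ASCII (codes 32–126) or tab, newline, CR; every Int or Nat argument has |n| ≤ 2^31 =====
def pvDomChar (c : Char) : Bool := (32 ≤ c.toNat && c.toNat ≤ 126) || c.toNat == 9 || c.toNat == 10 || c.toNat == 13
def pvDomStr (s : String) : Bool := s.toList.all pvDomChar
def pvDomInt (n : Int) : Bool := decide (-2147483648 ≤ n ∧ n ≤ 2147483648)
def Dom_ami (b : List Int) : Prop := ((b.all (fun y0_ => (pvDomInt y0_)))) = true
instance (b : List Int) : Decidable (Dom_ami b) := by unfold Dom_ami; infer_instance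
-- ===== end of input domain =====

-- B replaces A's first/flag toggle scan by collecting the nonzero-mark indices first and
-- writing +1/-1 by each mark's parity into a preallocated zero list (alternative decomposition).

-- ===== PORT A =====
-- state: (e, first, flag); one loop iteration of A's for-loop, on the value x = b[i]
def amiStep (st : List Int × Int × Int) (x : Int) : List Int × Int × Int :=
  if x == 0 then (st.1 ++ [0], st.2.1, st.2.2)
  else if st.2.1 ≠ 0 then (st.1 ++ [1], 0, 1)
  else if st.2.2 == 1 then (st.1 ++ [-1], st.2.1, 0)
  else (st.1 ++ [1], st.2.1, 1)

def ami (b : List Int) : List Int :=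
  ((PySem.List.pyRange 0 (PySem.List.len b)).foldl
      (fun st i => amiStep st (PySem.List.pyGetD b i 0)) (([], 1, 0) : List Int × Int × Int)).1 ++ [-1]

-- ===== PORT B =====
def ami_alt (b : List Int) : List Int :=
  ((PySem.List.enumerate (((PySem.List.enumerate b 0).filter (fun p => p.2 != 0)).map (fun p => p.1)) 0).foldl
      (fun acc ji => PySem.List.pySetD acc ji.2 (if ji.1 % 2 == 0 then (1 : Int) else -1))
      (b.map (fun _ => (0 : Int)))) ++ [-1]

-- ===== PRECONDITION & SPEC =====
def Spec_ami (b : List Int) (out : List Int) : Prop := out = ami_alt b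
instance (b : List Int) (out : List Int) : Decidable (Spec_ami b out) := by unfold Spec_ami; infer_instance

-- ===== CLAIM (what is proved, stated in full; the proofs are below) =====
def Claim_equal_ami : Prop := ∀ (b : List Int), Dom_ami b → Spec_ami b (ami b)

-- ===== LEMMAS AND PROOFS =====

-- common specification: the encoding with running mark-parity j, no trailing -1
def gspec : List Int → Int → List Int
  | [], _ => []
  | x :: r, j =>
    if x ≠ 0 then (if j % 2 == 0 then (1 : Int) else -1) :: gspec r (j + 1)
    else 0 :: gspec r j

-- the mark index list, positions relative to the front
def marksF : List Int → List Int
  | [] => []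
  | x :: r => if x ≠ 0 then 0 :: (marksF r).map (· + 1) else (marksF r).map (· + 1)

theorem marksF_nonneg : ∀ (b : List Int), ∀ m ∈ marksF b, 0 ≤ m := by
  intro b
  induction b with
  | nil => simp [marksF]
  | cons x r ih =>
    intro m hm
    simp only [marksF] at hm
    by_cases hx : x ≠ 0 <;> simp [hx, List.mem_map] at hm
    · rcases hm with h | ⟨y, hy, rfl⟩
      · omega
      · have := ih y hy; omega
    · rcases hm with ⟨y, hy, rfl⟩
      have := ih y hy; omega

theorem marks_eq (b : List Int) : ∀ (s : Int),
    ((PySem.List.enumerate b s).filter (fun p => p.2 != 0)).map (fun p => p.1)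
      = (marksF b).map (· + s) := by
  induction b with
  | nil => intro s; simp [PySem.List.enumerate_nil, marksF]
  | cons x r ih =>
    intro s
    rw [PySem.List.enumerate_cons]
    by_cases hx : x = 0
    · simp only [marksF, hx, List.filter_cons]
      simp only [bne_self_eq_false, Bool.false_eq_true, if_false, if_neg (by simp : ¬ (0:Int) ≠ 0)]
      rw [ih (s + 1), List.map_map]
      exact List.map_congr_left (fun y _ => by simp only [Function.comp_apply]; ring)
    · simp only [marksF, List.filter_cons, if_pos hx]
      have hb : (x != 0) = true := by simpa using hx
      simp only [hb, if_true, List.map_cons]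
      rw [ih (s + 1), List.map_map]
      refine List.cons_eq_cons.mpr ⟨by ring, ?_⟩
      exact List.map_congr_left (fun y _ => by simp only [Function.comp_apply]; ring)

-- shifting every mark index by one writes one cell deeper
theorem set_shift (ms : List Int) (hms : ∀ m ∈ ms, 0 ≤ m) :
    ∀ (j : Int) (a : Int) (e : List Int),
    (PySem.List.enumerate (ms.map (· + 1)) j).foldl
        (fun acc ji => PySem.List.pySetD acc ji.2 (if ji.1 % 2 == 0 then (1 : Int) else -1)) (a :: e)
      = a :: (PySem.List.enumerate ms j).foldl
        (fun acc ji => PySem.List.pySetD acc ji.2 (if ji.1 % 2 == 0 then (1 : Int) else -1)) e := by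
  induction ms with
  | nil => intro j a e; simp [PySem.List.enumerate_nil]
  | cons m ms ih =>
    intro j a e
    have hm : 0 ≤ m := hms m (by simp)
    rw [List.map_cons, PySem.List.enumerate_cons, PySem.List.enumerate_cons]
    simp only [List.foldl_cons]
    have hset : PySem.List.pySetD (a :: e) (m + 1) (if j % 2 == 0 then (1 : Int) else -1)
        = a :: PySem.List.pySetD e m (if j % 2 == 0 then (1 : Int) else -1) := by
      rw [PySem.List.pySetD_of_nonneg (a :: e) _ (by omega), PySem.List.pySetD_of_nonneg e _ hm]
      have : (m + 1).toNat = m.toNat + 1 := by omega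
      rw [this]
      rfl
    rw [hset, ih (fun m hm => hms m (by simp [hm]))]

-- B's populate pass computes gspec
theorem alt_main (b : List Int) : ∀ (j : Int),
    (PySem.List.enumerate (marksF b) j).foldl
        (fun acc ji => PySem.List.pySetD acc ji.2 (if ji.1 % 2 == 0 then (1 : Int) else -1))
        (b.map (fun _ => (0 : Int)))
      = gspec b j := by
  induction b with
  | nil => intro j; simp [marksF, PySem.List.enumerate_nil, gspec]
  | cons x r ih =>
    intro j
    by_cases hx : x = 0
    · simp only [marksF, hx, gspec, List.map_cons, if_neg (by simp : ¬ (0:Int) ≠ 0)]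
      rw [set_shift _ (marksF_nonneg r) j 0 (r.map (fun _ => (0:Int))), ih j]
    · simp only [marksF, gspec, List.map_cons, if_pos hx]
      rw [PySem.List.enumerate_cons, List.foldl_cons]
      have h0 : PySem.List.pySetD ((0:Int) :: r.map (fun _ => (0:Int))) 0
          (if j % 2 == 0 then (1 : Int) else -1)
          = (if j % 2 == 0 then (1 : Int) else -1) :: r.map (fun _ => (0:Int)) := by
        rw [PySem.List.pySetD_of_nonneg _ _ (le_refl (0:Int))]; rfl
      rw [h0, set_shift _ (marksF_nonneg r) (j + 1) _ _, ih (j + 1)]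

theorem ami_alt_eq (b : List Int) : ami_alt b = gspec b 0 ++ [-1] := by
  unfold ami_alt
  rw [marks_eq b 0]
  have h : (marksF b).map (· + 0) = marksF b := by
    simp
  rw [h, alt_main b 0]

-- A's fold computes gspec: invariant on (first, flag) vs. the mark parity j
theorem a_main (b : List Int) : ∀ (e : List Int) (first flag j : Int),
    ((first ≠ 0 ∧ j = 0) ∨ (first = 0 ∧ 0 ≤ j ∧ (flag = 1 ↔ j % 2 = 1))) →
    (b.foldl amiStep (e, first, flag)).1 = e ++ gspec b j := by
  induction b with
  | nil => intro e first flag j _; simp [gspec]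
  | cons x r ih =>
    intro e first flag j hrel
    rw [List.foldl_cons]
    by_cases hx : x = 0
    · have : amiStep (e, first, flag) x = (e ++ [0], first, flag) := by
        simp [amiStep, hx]
      rw [this, ih _ _ _ j hrel]
      simp [gspec, hx]
    · rcases hrel with ⟨hf, hj⟩ | ⟨hf, hj0, hfl⟩
      · have : amiStep (e, first, flag) x = (e ++ [1], 0, 1) := by
          simp [amiStep, hx, hf]
        rw [this, ih _ _ _ (j + 1) (Or.inr ⟨rfl, by omega, by omega⟩)]
        simp [gspec, hx, hj]
      · by_cases hfl1 : flag = 1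
        · have hodd : j % 2 = 1 := hfl.mp hfl1
          have : amiStep (e, first, flag) x = (e ++ [-1], first, 0) := by
            simp [amiStep, hx, hf, hfl1]
          rw [this, hf, ih _ _ _ (j + 1) (Or.inr ⟨rfl, by omega, by omega⟩)]
          have : (j % 2 == 0) = false := by simp [hodd]
          simp [gspec, hx, this]
        · have heven : j % 2 = 0 := by
            have := hfl.mpr; omega
          have : amiStep (e, first, flag) x = (e ++ [1], first, 1) := by
            simp [amiStep, hx, hf, hfl1]
          rw [this, hf, ih _ _ _ (j + 1) (Or.inr ⟨rfl, by omega, by omega⟩)]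
          simp [gspec, hx, heven]

theorem ami_eq (b : List Int) : ami b = gspec b 0 ++ [-1] := by
  unfold ami
  rw [PySem.List.foldl_pyRange_zero_pyGetD b 0 amiStep (([], 1, 0) : List Int × Int × Int)]
  rw [a_main b [] 1 0 0 (Or.inl ⟨one_ne_zero, rfl⟩)]
  simp

-- ===== VERDICT (by name: the statement is the Claim_ definition above) =====
theorem ami_spec : Claim_equal_ami := by
  intro b _
  unfold Spec_ami
  rw [ami_eq, ami_alt_eq]
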